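-- pv_equiv track=rewrite | github.com/BAMDH/Cosas_Uni | Taller programación/Proyecto/proyecto0/menu.py | cargar_lista_usuarios
-- ===== SOURCE A (Python) =====
-- def cargar_lista_usuarios(lista_hileras_usuario, diccionario, elemento_actual):
--
--     if(elemento_actual >= len(lista_hileras_usuario)):
--         return diccionario
--     else:
--         #se recupera la llave/valor de la lista
--         llave = lista_hileras_usuario[elemento_actual]
--         valor = lista_hileras_usuario[elemento_actual + 1]
--         #se crea la nueva entrada en el diccionario
--         llave = llave.replace(" ", "")
--         valor= valor.replace(" ", "")
--         valor= valor.replace("'","")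
--         diccionario[llave] = valor
--         elemento_actual += 2
--         return cargar_lista_usuarios(lista_hileras_usuario, diccionario, elemento_actual)
-- ===== SOURCE B (Python) =====
-- def cargar_lista_usuarios(lista_hileras_usuario, diccionario, elemento_actual):
--     # iterative version: one pass over the key positions with a step-2 range,
--     # mutating and returning the same dict (like the original)
--     for i in range(elemento_actual, len(lista_hileras_usuario), 2):
--         llave = lista_hileras_usuario[i].replace(" ", "")
--         valor = lista_hileras_usuario[i + 1].replace(" ", "").replace("'", "")
--         diccionario[llave] = valor
--     return diccionario
-- ===== Notes on version B (the rewrite author's own statement) =====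
-- stated objective: idiomatic
-- what changed: Replaced the tail recursion (one call frame per key/value pair) with a single explicit for-loop over range(elemento_actual, len(lista), 2), mutating the same dict in place.
-- outside the precondition, e.g. on cargar_lista_usuarios(['a'], {}, 0): A raises IndexError, B raises IndexError; on cargar_lista_usuarios(['a', 'b'], {}, -4): A raises IndexError, B raises IndexError
import Mathlib
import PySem

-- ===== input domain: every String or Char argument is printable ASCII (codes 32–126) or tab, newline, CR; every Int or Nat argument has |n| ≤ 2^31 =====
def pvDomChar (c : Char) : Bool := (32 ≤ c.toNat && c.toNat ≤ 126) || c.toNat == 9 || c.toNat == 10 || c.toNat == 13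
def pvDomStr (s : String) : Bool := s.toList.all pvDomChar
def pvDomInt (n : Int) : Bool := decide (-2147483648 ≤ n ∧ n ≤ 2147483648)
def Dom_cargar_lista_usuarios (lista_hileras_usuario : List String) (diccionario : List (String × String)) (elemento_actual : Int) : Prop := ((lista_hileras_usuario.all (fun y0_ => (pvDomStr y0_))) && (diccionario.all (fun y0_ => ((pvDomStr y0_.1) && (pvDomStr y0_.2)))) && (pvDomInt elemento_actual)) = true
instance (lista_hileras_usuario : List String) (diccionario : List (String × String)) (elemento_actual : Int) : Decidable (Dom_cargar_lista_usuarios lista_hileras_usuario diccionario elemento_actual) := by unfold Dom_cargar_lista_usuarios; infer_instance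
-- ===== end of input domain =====

-- B replaces A's tail recursion by a single explicit step-2 index loop over the same list,
-- mutating the dict in place like A (both Pythons mutate `diccionario`; equality here is on the return value,
-- which for both IS that dict).

-- ===== PORT A =====
def cargar_lista_usuarios (lista_hileras_usuario : List String) (diccionario : List (String × String)) (elemento_actual : Int) : List (String × String) :=
  if (lista_hileras_usuario.length : Int) ≤ elemento_actual then diccionario
  else
    match PySem.List.pyGet? lista_hileras_usuario elemento_actual,
          PySem.List.pyGet? lista_hileras_usuario (elemento_actual + 1) with
    | some llave0, some valor0 =>
        let llave := PySem.Str.replace llave0 " " ""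
        let valor := PySem.Str.replace (PySem.Str.replace valor0 " " "") "'" ""
        cargar_lista_usuarios lista_hileras_usuario
          ((PySem.Dict.mk diccionario).insert llave valor).items (elemento_actual + 2)
    | _, _ => diccionario  -- IndexError in Python; these inputs are outside Pre_
termination_by ((lista_hileras_usuario.length : Int) - elemento_actual).toNat
decreasing_by omega

-- ===== PORT B =====
def cargar_lista_usuarios_alt (lista_hileras_usuario : List String) (diccionario : List (String × String)) (elemento_actual : Int) : List (String × String) :=
  ((PySem.List.pyRange elemento_actual lista_hileras_usuario.length 2).foldl
    (fun d i =>
      match PySem.List.pyGet? lista_hileras_usuario i with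
      | none => d  -- IndexError in Python; outside Pre_
      | some l0 =>
        match PySem.List.pyGet? lista_hileras_usuario (i + 1) with
        | none => d  -- IndexError in Python; outside Pre_
        | some v0 =>
            d.insert (PySem.Str.replace l0 " " "")
                     (PySem.Str.replace (PySem.Str.replace v0 " " "") "'" ""))
    (PySem.Dict.mk diccionario)).items

-- ===== PRECONDITION & SPEC =====
-- Pre_ excludes exactly the inputs where the Python raises IndexError: a key position below -len,
-- or a parity that makes the last key's value index fall past the end of the list.
def Pre_cargar_lista_usuarios (lista_hileras_usuario : List String) (diccionario : List (String × String)) (elemento_actual : Int) : Prop :=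
  (lista_hileras_usuario.length : Int) ≤ elemento_actual ∨
    (-(lista_hileras_usuario.length : Int) ≤ elemento_actual ∧
      ((lista_hileras_usuario.length : Int) - elemento_actual) % 2 = 0)
instance (lista_hileras_usuario : List String) (diccionario : List (String × String)) (elemento_actual : Int) : Decidable (Pre_cargar_lista_usuarios lista_hileras_usuario diccionario elemento_actual) := by unfold Pre_cargar_lista_usuarios; infer_instance
def pvWitness_cargar_lista_usuarios : List String × (List (String × String)) × Int := (["a b", "x' y"], [], 0)

def Spec_cargar_lista_usuarios (lista_hileras_usuario : List String) (diccionario : List (String × String)) (elemento_actual : Int) (out : List (String × String)) : Prop := out = cargar_lista_usuarios_alt lista_hileras_usuario diccionario elemento_actual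
instance (lista_hileras_usuario : List String) (diccionario : List (String × String)) (elemento_actual : Int) (out : List (String × String)) : Decidable (Spec_cargar_lista_usuarios lista_hileras_usuario diccionario elemento_actual out) := by unfold Spec_cargar_lista_usuarios; infer_instance

-- ===== CLAIM (what is proved, stated in full; the proofs are below) =====
def Claim_equal_cargar_lista_usuarios : Prop := ∀ (lista_hileras_usuario : List String) (diccionario : List (String × String)) (elemento_actual : Int), Dom_cargar_lista_usuarios lista_hileras_usuario diccionario elemento_actual → Pre_cargar_lista_usuarios lista_hileras_usuario diccionario elemento_actual → Spec_cargar_lista_usuarios lista_hileras_usuario diccionario elemento_actual (cargar_lista_usuarios lista_hileras_usuario diccionario elemento_actual)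

-- ===== LEMMAS AND PROOFS =====

lemma pyRange_two_eq_nil (a b : Int) (h : b ≤ a) : PySem.List.pyRange a b 2 = [] := by
  simp only [PySem.List.pyRange]
  norm_num
  omega

lemma pyRange_two_cons (a b : Int) (h : a < b) :
    PySem.List.pyRange a b 2 = a :: PySem.List.pyRange (a + 2) b 2 := by
  simp only [PySem.List.pyRange]
  norm_num
  rw [if_pos h]
  have hn : ((b - a + 2 - 1) / 2).toNat
      = (if a + 2 < b then ((b - (a + 2) + 2 - 1) / 2).toNat else 0) + 1 := by
    split_ifs <;> omega
  rw [hn, List.range_succ_eq_map, List.map_cons, List.map_map]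
  refine List.cons_eq_cons.mpr ⟨by norm_num, ?_⟩
  apply List.map_congr_left
  intro k _
  simp only [Function.comp]
  push_cast
  ring

lemma loop_eq (lista : List String) (e : Int) (d : PySem.Dict String String)
    (h : (lista.length : Int) ≤ e ∨
      (-(lista.length : Int) ≤ e ∧ ((lista.length : Int) - e) % 2 = 0)) :
    cargar_lista_usuarios lista d.items e =
      ((PySem.List.pyRange e lista.length 2).foldl
        (fun d i =>
          match PySem.List.pyGet? lista i with
          | none => d
          | some l0 =>
            match PySem.List.pyGet? lista (i + 1) with
            | none => d
            | some v0 =>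
                d.insert (PySem.Str.replace l0 " " "")
                         (PySem.Str.replace (PySem.Str.replace v0 " " "") "'" ""))
        d).items := by
  by_cases hle : (lista.length : Int) ≤ e
  · rw [cargar_lista_usuarios, if_pos hle, pyRange_two_eq_nil _ _ hle]
    rfl
  · push Not at hle
    obtain ⟨hlo, hpar⟩ := h.resolve_left (by omega)
    have h1 : PySem.List.pyGet? lista e ≠ none := by
      simp only [ne_eq, PySem.List.pyGet?_eq_none_iff, PySem.Raise.InRange]
      omega
    have h2 : PySem.List.pyGet? lista (e + 1) ≠ none := by
      simp only [ne_eq, PySem.List.pyGet?_eq_none_iff, PySem.Raise.InRange]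
      omega
    obtain ⟨l0, hl0⟩ := Option.ne_none_iff_exists'.mp h1
    obtain ⟨v0, hv0⟩ := Option.ne_none_iff_exists'.mp h2
    rw [cargar_lista_usuarios, if_neg (by omega), hl0, hv0,
        pyRange_two_cons _ _ hle, List.foldl_cons, hl0, hv0]
    exact loop_eq lista (e + 2)
      (d.insert (PySem.Str.replace l0 " " "")
        (PySem.Str.replace (PySem.Str.replace v0 " " "") "'" "")) (by omega)
termination_by ((lista.length : Int) - e).toNat
decreasing_by omega

-- ===== VERDICT (by name: the statement is the Claim_ definition above) =====
theorem cargar_lista_usuarios_spec : Claim_equal_cargar_lista_usuarios := by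
  intro lista d e _ hpre
  show _ = _
  exact loop_eq lista e (PySem.Dict.mk d) hpre
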